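-- pv_equiv track=rewrite | github.com/Lusanda-Hlela/codewars | intermediate_level/range_extraction.py | solution
-- ===== SOURCE A (Python) =====
-- def solution(args):
--   l = len(args)
--   ranges = list()
--   counter = 0
--
--   while l:
--     integers = l
--     while (integers > 1) and ((args[counter] + 1) == args[counter + 1]):
--       ranges.append(args[counter])
--       args.pop(counter)
--       integers -= 1
--     else:
--       ranges.append(args[counter])
--       if len(ranges) >= 3:
--         args.pop(counter)
--         args.insert(counter, str(ranges[0]) + '-' + str(ranges[-1]))
--         counter += 1
--         l -= len(ranges)
--         ranges.clear()
--       else: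
--         if len(ranges) == 2:
--           args.insert(counter, str(ranges[0]))
--           args[counter + 1] = str(ranges[1])
--           counter += 2
--           ranges.clear()
--           l -= 2
--         else:
--           args[counter] = str(ranges[0])
--           counter += 1
--           ranges.clear()
--           l -= 1
--
--   return ','.join(args)
-- ===== SOURCE B (Python) =====
-- def solution(args):
--     out = []
--     i, n = 0, len(args)
--     while i < n:
--         j = i
--         while j + 1 < n and args[j] + 1 == args[j + 1]:
--             j += 1
--         if j - i >= 2:
--             out.append(str(args[i]) + '-' + str(args[j]))
--         elif j == i:
--             out.append(str(args[i]))
--         else: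
--             out.append(str(args[i]))
--             out.append(str(args[j]))
--         i = j + 1
--     return ','.join(out)
-- ===== Notes on version B (the rewrite author's own statement) =====
-- stated objective: simpler
-- what changed: Replaces A's in-place rewriting of the input list (repeated pop/insert at a moving index while tracking a countdown) by a single non-mutating index scan that finds each maximal consecutive run and appends its formatted form to a fresh output list.
import Mathlib
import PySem

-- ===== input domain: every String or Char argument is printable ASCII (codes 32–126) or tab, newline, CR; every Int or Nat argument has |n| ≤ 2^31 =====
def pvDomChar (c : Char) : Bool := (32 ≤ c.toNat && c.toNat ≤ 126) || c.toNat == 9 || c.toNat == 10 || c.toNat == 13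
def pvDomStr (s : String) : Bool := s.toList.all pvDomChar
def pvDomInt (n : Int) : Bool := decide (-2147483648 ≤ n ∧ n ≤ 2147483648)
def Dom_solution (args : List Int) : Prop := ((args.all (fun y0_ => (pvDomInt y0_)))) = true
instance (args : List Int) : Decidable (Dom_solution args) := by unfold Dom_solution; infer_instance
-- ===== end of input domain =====

-- B replaces A's in-place pop/insert rewriting of the input list by one non-mutating
-- index scan over maximal consecutive runs (objective: simpler). A mutates its argument in
-- place; B does not — the equivalence proved here is about the RETURN value only.

-- ===== PORT A =====
-- A's list `args` holds ints and, once processed, strings: modelled as `Int ⊕ String`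
-- (.inl = int, .inr = str). Indexing is always in range in A's executions, so `getD`
-- with a junk default is exact there.
def aGet (args : List (Int ⊕ String)) (i : Nat) : Int ⊕ String := args.getD i (.inl 0)

def aInt (o : Int ⊕ String) : Int := match o with | .inl n => n | .inr _ => 0

def aStr (o : Int ⊕ String) : String := match o with | .inl n => PySem.Int.toStr n | .inr s => s

-- Python's `args[counter] + 1 == args[counter + 1]`: int-vs-str comparison is False.
def aAdj (args : List (Int ⊕ String)) (c : Nat) : Bool :=
  match aGet args c, aGet args (c + 1) with
  | .inl a, .inl b => a + 1 == b
  | _, _ => false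

-- inner `while (integers > 1) and (args[counter]+1 == args[counter+1])`:
-- append args[counter] to ranges, pop it; `integers` is the first argument.
def aInner : Nat → List (Int ⊕ String) → List Int → Nat → List (Int ⊕ String) × List Int
  | 0, args, ranges, _ => (args, ranges)
  | 1, args, ranges, _ => (args, ranges)
  | (f + 2), args, ranges, c =>
    if aAdj args c then
      aInner (f + 1) (args.eraseIdx c) (ranges ++ [aInt (aGet args c)]) c
    else (args, ranges)

-- outer `while l:` loop
def aOuter (l : Nat) (args : List (Int ⊕ String)) (c : Nat) : List (Int ⊕ String) :=
  if hl : l = 0 then args else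
    let p := aInner l args [] c
    let ranges := p.2 ++ [aInt (aGet p.1 c)]
    if ranges.length ≥ 3 then
      aOuter (l - ranges.length)
        ((p.1.eraseIdx c).insertIdx c
          (.inr (PySem.Int.toStr (ranges.headD 0) ++ "-" ++ PySem.Int.toStr (ranges.getLastD 0))))
        (c + 1)
    else if ranges.length = 2 then
      aOuter (l - 2)
        ((p.1.insertIdx c (.inr (PySem.Int.toStr (ranges.headD 0)))).set (c + 1)
          (.inr (PySem.Int.toStr (ranges.getD 1 0))))
        (c + 2)
    else
      aOuter (l - 1) (p.1.set c (.inr (PySem.Int.toStr (ranges.headD 0)))) (c + 1)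
  termination_by l
  decreasing_by
  · simp only [List.length_append, List.length_cons]; omega
  · omega
  · omega

def solution (args : List Int) : String :=
  PySem.Str.join "," ((aOuter args.length (args.map .inl) 0).map aStr)

-- ===== PORT B =====
-- inner `while j + 1 < n and args[j] + 1 == args[j+1]: j += 1` (indices in range, getD exact)
def bScan (args : List Int) (j : Nat) : Nat :=
  if j + 1 < args.length ∧ args.getD j 0 + 1 = args.getD (j + 1) 0 then
    bScan args (j + 1)
  else j
  termination_by args.length - j
  decreasing_by omega

theorem bScan_ge (args : List Int) (j : Nat) : j ≤ bScan args j := by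
  unfold bScan
  split
  · exact le_trans (by omega) (bScan_ge args (j + 1))
  · exact le_refl j
  termination_by args.length - j
  decreasing_by omega

-- outer `while i < n:` loop, accumulating `out`
def bLoop (args : List Int) (i : Nat) (out : List String) : List String :=
  if hi : i < args.length then
    let j := bScan args i
    let out' :=
      if j - i ≥ 2 then
        out ++ [PySem.Int.toStr (args.getD i 0) ++ "-" ++ PySem.Int.toStr (args.getD j 0)]
      else if j = i then out ++ [PySem.Int.toStr (args.getD i 0)]
      else out ++ [PySem.Int.toStr (args.getD i 0), PySem.Int.toStr (args.getD j 0)]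
    bLoop args (j + 1) out'
  else out
  termination_by args.length - i
  decreasing_by have := bScan_ge args i; omega

def solution_alt (args : List Int) : String :=
  PySem.Str.join "," (bLoop args 0 [])

-- ===== PRECONDITION & SPEC =====
def Spec_solution (args : List Int) (out : String) : Prop := out = solution_alt args
instance (args : List Int) (out : String) : Decidable (Spec_solution args out) := by unfold Spec_solution; infer_instance

-- ===== CLAIM (what is proved, stated in full; the proofs are below) =====
def Claim_equal_solution : Prop := ∀ (args : List Int), Dom_solution args → Spec_solution args (solution args)

-- ===== LEMMAS AND PROOFS =====

-- takeRun x t = (r, rest): x :: r is the maximal consecutive run starting at x, rest the remainder.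
def takeRun : Int → List Int → List Int × List Int
  | _, [] => ([], [])
  | x, y :: t => if x + 1 = y then ((takeRun y t).1.cons y, (takeRun y t).2) else ([], y :: t)

theorem takeRun_append (x : Int) (t : List Int) : t = (takeRun x t).1 ++ (takeRun x t).2 := by
  induction t generalizing x with
  | nil => rfl
  | cons y t ih =>
    simp only [takeRun]
    split
    · simpa using ih y
    · simp

theorem takeRun_len (x : Int) (t : List Int) :
    (takeRun x t).1.length + (takeRun x t).2.length = t.length := by
  conv_rhs => rw [takeRun_append x t]
  simp

-- canonical grouping: format each maximal run
def G : List Int → List String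
  | [] => []
  | x :: t =>
    (if (takeRun x t).1.length + 1 ≥ 3 then
      [PySem.Int.toStr x ++ "-" ++ PySem.Int.toStr ((takeRun x t).1.getLastD x)]
     else (x :: (takeRun x t).1).map PySem.Int.toStr) ++ G (takeRun x t).2
  termination_by t => t.length
  decreasing_by have := takeRun_len x t; simp only [List.length_cons]; omega

theorem dropLast_append_getLastD (x : Int) (r : List Int) :
    (x :: r).dropLast ++ [r.getLastD x] = x :: r := by
  induction r generalizing x with
  | nil => rfl
  | cons y r ih =>
    rw [List.getLastD_cons, List.dropLast_cons₂, List.cons_append, ih y]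

theorem eraseIdx_at_len {α : Type} (l1 : List α) (x : α) (l2 : List α) :
    (l1 ++ x :: l2).eraseIdx l1.length = l1 ++ l2 := by
  induction l1 with
  | nil => simp
  | cons a l ih => simp [ih]

theorem insertIdx_at_len {α : Type} (l1 : List α) (a : α) (l2 : List α) :
    (l1 ++ l2).insertIdx l1.length a = l1 ++ a :: l2 := by
  induction l1 with
  | nil => simp
  | cons b l ih => simp [ih]

theorem set_at_len {α : Type} (l1 : List α) (x a : α) (l2 : List α) :
    (l1 ++ x :: l2).set l1.length a = l1 ++ a :: l2 := by
  induction l1 with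
  | nil => simp
  | cons b l ih => simp [ih]

theorem getD_at_len {α : Type} (l1 : List α) (x d : α) (l2 : List α) :
    (l1 ++ x :: l2).getD l1.length d = x := by
  induction l1 with
  | nil => rfl
  | cons b l ih => simpa using ih

-- ---- A-side characterisation ----

theorem aGet_mid (P : List (Int ⊕ String)) (o : Int ⊕ String) (rest : List (Int ⊕ String)) :
    aGet (P ++ o :: rest) P.length = o := by
  simp [aGet]

theorem aInner_spec (t : List Int) (x : Int) (P : List (Int ⊕ String)) (ranges : List Int) :
    aInner (t.length + 1) (P ++ (x :: t).map .inl) ranges P.length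
      = (P ++ ((takeRun x t).1.getLastD x :: (takeRun x t).2).map .inl,
         ranges ++ (x :: (takeRun x t).1).dropLast) := by
  induction t generalizing x P ranges with
  | nil => simp [aInner, takeRun]
  | cons y t ih =>
    have h1 : aGet (P ++ Sum.inl x :: Sum.inl y :: t.map Sum.inl) P.length = Sum.inl x :=
      aGet_mid P (Sum.inl x) (Sum.inl y :: t.map Sum.inl)
    have h2 : aGet (P ++ Sum.inl x :: Sum.inl y :: t.map Sum.inl) (P.length + 1) = Sum.inl y := by
      have he : P ++ Sum.inl x :: Sum.inl y :: t.map Sum.inl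
          = (P ++ [Sum.inl x]) ++ .inl y :: t.map .inl := by simp
      have hl : P.length + 1 = (P ++ [Sum.inl x]).length := by simp
      rw [he, hl]
      exact aGet_mid (P ++ [Sum.inl x]) (Sum.inl y) (t.map Sum.inl)
    have hadj : aAdj (P ++ Sum.inl x :: Sum.inl y :: t.map Sum.inl) P.length = (x + 1 == y) := by
      unfold aAdj
      rw [h1, h2]
    simp only [List.map_cons, List.length_cons, aInner, hadj]
    by_cases hxy : x + 1 = y
    · have hbeq : (x + 1 == y) = true := by simpa using hxy
      rw [hbeq]
      simp only [if_true, List.map_cons]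
      have herase : (P ++ Sum.inl x :: Sum.inl y :: t.map Sum.inl).eraseIdx P.length
          = P ++ Sum.inl y :: t.map Sum.inl := by
        rw [eraseIdx_at_len]
      rw [herase, h1]
      have := ih y P (ranges ++ [aInt (.inl x)])
      simp only [List.map_cons] at this
      rw [this]
      simp only [takeRun, if_pos hxy, aInt, Prod.mk.injEq]
      constructor
      · show P ++ Sum.inl ((takeRun y t).1.getLastD y) :: List.map Sum.inl (takeRun y t).2
            = P ++ Sum.inl ((y :: (takeRun y t).1).getLastD x) :: List.map Sum.inl (takeRun y t).2
        rw [List.getLastD_cons]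
      · rw [List.dropLast_cons₂]
        simp
    · have hbeq : (x + 1 == y) = false := by simpa using hxy
      rw [hbeq]
      simp [takeRun, hxy]

theorem aOuter_spec (t : List Int) (P : List String) :
    aOuter t.length (P.map .inr ++ t.map .inl) P.length = (P ++ G t).map .inr := by
  match t with
  | [] => simp [aOuter, G]
  | x :: t =>
    rw [aOuter]
    simp only [List.length_cons, Nat.succ_ne_zero, dite_false]
    have hinner := aInner_spec t x (P.map .inr) []
    set r := (takeRun x t).1 with hr
    set rest := (takeRun x t).2 with hrest
    have hlen : r.length + rest.length = t.length := takeRun_len x t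
    clear_value r rest
    simp only [List.length_map] at hinner
    rw [hinner]
    have hget : aGet (P.map Sum.inr ++ (r.getLastD x :: rest).map Sum.inl) (P.map Sum.inr).length
        = .inl (r.getLastD x) := aGet_mid (P.map .inr) (.inl (r.getLastD x)) (rest.map .inl)
    simp only [List.length_map] at hget
    rw [hget]
    have hranges : [] ++ (x :: r).dropLast ++ [aInt (.inl (r.getLastD x))]
        = x :: r := by simpa [aInt] using dropLast_append_getLastD x r
    rw [hranges]
    by_cases h3 : (x :: r).length ≥ 3
    · rw [if_pos h3]
      have herase : (P.map Sum.inr ++ (r.getLastD x :: rest).map Sum.inl).eraseIdx P.length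
          = P.map Sum.inr ++ rest.map Sum.inl := by
        have : P.length = (P.map (Sum.inr : String → Int ⊕ String)).length := by simp
        rw [this, List.map_cons, eraseIdx_at_len]
      have hins : (P.map Sum.inr ++ rest.map Sum.inl).insertIdx P.length
            (Sum.inr (PySem.Int.toStr ((x :: r).headD 0) ++ "-" ++ PySem.Int.toStr ((x :: r).getLastD 0)) :
              Int ⊕ String)
          = (P ++ [PySem.Int.toStr x ++ "-" ++ PySem.Int.toStr (r.getLastD x)]).map Sum.inr
            ++ rest.map Sum.inl := by
        have hp : P.length = (P.map (Sum.inr : String → Int ⊕ String)).length := by simp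
        rw [hp, insertIdx_at_len, List.getLastD_cons]
        simp
      rw [herase, hins]
      have hl : t.length + 1 - (x :: r).length = rest.length := by
        simp only [List.length_cons]; omega
      rw [hl]
      have hc : P.length + 1 = (P ++ [PySem.Int.toStr x ++ "-" ++ PySem.Int.toStr (r.getLastD x)]).length := by
        simp
      rw [hc, aOuter_spec rest]
      rw [G]
      simp only [← hr, ← hrest]
      have h3' : r.length + 1 ≥ 3 := by simpa using h3
      rw [if_pos h3']
      simp
    · rw [if_neg h3]
      by_cases h2 : (x :: r).length = 2
      · rw [if_pos h2]
        obtain ⟨y, hy⟩ : ∃ y, r = [y] := by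
          cases r with
          | nil => simp at h2
          | cons a s => cases s with
            | nil => exact ⟨a, rfl⟩
            | cons b u => simp at h2
        have hins : (P.map Sum.inr ++ (r.getLastD x :: rest).map Sum.inl).insertIdx P.length
              (Sum.inr (PySem.Int.toStr ((x :: r).headD 0)) : Int ⊕ String)
            = P.map Sum.inr ++ (Sum.inr (PySem.Int.toStr x) : Int ⊕ String)
                :: (r.getLastD x :: rest).map Sum.inl := by
          have hp : P.length = (P.map (Sum.inr : String → Int ⊕ String)).length := by simp
          rw [hp, insertIdx_at_len]
          simp
        rw [hins]
        have hset : (P.map Sum.inr ++ (Sum.inr (PySem.Int.toStr x) : Int ⊕ String)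
                :: (r.getLastD x :: rest).map Sum.inl).set
              (P.length + 1) (Sum.inr (PySem.Int.toStr ((x :: r).getD 1 0)))
            = (P ++ [PySem.Int.toStr x, PySem.Int.toStr (r.getLastD x)]).map Sum.inr ++ rest.map Sum.inl := by
          have hp : P.length + 1 = ((P.map (Sum.inr : String → Int ⊕ String))
              ++ [(Sum.inr (PySem.Int.toStr x) : Int ⊕ String)]).length := by simp
          have hre : P.map (Sum.inr : String → Int ⊕ String)
                ++ (Sum.inr (PySem.Int.toStr x) : Int ⊕ String) :: (r.getLastD x :: rest).map Sum.inl
              = (P.map (Sum.inr : String → Int ⊕ String) ++ [(Sum.inr (PySem.Int.toStr x) : Int ⊕ String)])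
                ++ Sum.inl (r.getLastD x) :: rest.map Sum.inl := by simp
          rw [hre, hp, set_at_len]
          subst hy
          simp
        rw [hset]
        have hl : t.length + 1 - 2 = rest.length := by
          subst hy; simp only [List.length_singleton] at hlen; omega
        rw [hl]
        have hc : P.length + 2 = (P ++ [PySem.Int.toStr x, PySem.Int.toStr (r.getLastD x)]).length := by simp
        rw [hc, aOuter_spec rest]
        rw [G]
        simp only [← hr, ← hrest]
        rw [if_neg (by subst hy; simp)]
        subst hy
        simp
      · rw [if_neg h2]
        have hr0 : r = [] := by
          cases r with
          | nil => rfl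
          | cons a s =>
            exfalso
            simp only [List.length_cons] at h3 h2
            omega
        have hset : (P.map Sum.inr ++ (r.getLastD x :: rest).map Sum.inl).set P.length
              (Sum.inr (PySem.Int.toStr ((x :: r).headD 0)))
            = (P ++ [PySem.Int.toStr x]).map Sum.inr ++ rest.map Sum.inl := by
          have hp : P.length = (P.map (Sum.inr : String → Int ⊕ String)).length := by simp
          rw [hp, List.map_cons, set_at_len]
          subst hr0
          simp
        rw [hset]
        have hl : t.length + 1 - 1 = rest.length := by
          subst hr0; simp only [List.length_nil] at hlen; omega
        rw [hl]
        have hc : P.length + 1 = (P ++ [PySem.Int.toStr x]).length := by simp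
        rw [hc, aOuter_spec rest]
        rw [G]
        simp only [← hr, ← hrest]
        rw [if_neg (by subst hr0; simp)]
        subst hr0
        simp
  termination_by t.length
  decreasing_by
  · simp only [List.length_cons]; omega
  · simp only [List.length_cons]; omega
  · simp only [List.length_cons]; omega

-- ---- B-side characterisation ----

theorem bScan_spec (t : List Int) (x : Int) (pre : List Int) :
    bScan (pre ++ x :: t) pre.length = pre.length + (takeRun x t).1.length := by
  induction t generalizing x pre with
  | nil =>
    rw [bScan]
    rw [if_neg (by simp)]
    simp [takeRun]
  | cons y t ih =>
    rw [bScan]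
    have hgx : (pre ++ x :: y :: t).getD pre.length 0 = x := getD_at_len pre x 0 (y :: t)
    have hgy : (pre ++ x :: y :: t).getD (pre.length + 1) 0 = y := by
      have he : pre ++ x :: y :: t = (pre ++ [x]) ++ y :: t := by simp
      have hl : pre.length + 1 = (pre ++ [x]).length := by simp
      rw [he, hl]
      exact getD_at_len (pre ++ [x]) y 0 t
    by_cases hxy : x + 1 = y
    · rw [if_pos (by refine ⟨by simp, ?_⟩; rw [hgx, hgy]; exact hxy)]
      have hre : pre ++ x :: y :: t = (pre ++ [x]) ++ y :: t := by simp
      rw [hre]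
      have := ih y (pre ++ [x])
      simp only [List.length_append, List.length_singleton] at this
      rw [this]
      simp only [takeRun, if_pos hxy]
      simp
      omega
    · rw [if_neg (by rw [hgx, hgy]; intro h; exact hxy h.2)]
      simp [takeRun, hxy]

theorem bLoop_spec (t : List Int) (pre : List Int) (out : List String) :
    bLoop (pre ++ t) pre.length out = out ++ G t := by
  match t with
  | [] => rw [bLoop]; simp [G]
  | x :: t =>
    rw [bLoop]
    rw [dif_pos (by simp)]
    have hscan := bScan_spec t x pre
    set r := (takeRun x t).1 with hr
    set rest := (takeRun x t).2 with hrest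
    have hlen : r.length + rest.length = t.length := takeRun_len x t
    clear_value r rest
    rw [hscan]
    have hgi : (pre ++ x :: t).getD pre.length 0 = x := getD_at_len pre x 0 t
    have hsplit : pre ++ x :: t = (pre ++ x :: r) ++ rest := by
      conv_lhs => rw [takeRun_append x t]
      simp [← hr, ← hrest]
    have hgj : (pre ++ x :: t).getD (pre.length + r.length) 0 = r.getLastD x := by
      have h1 : pre ++ x :: t = (pre ++ (x :: r).dropLast) ++ r.getLastD x :: rest := by
        rw [hsplit]
        conv_lhs => rw [show x :: r = (x :: r).dropLast ++ [r.getLastD x] from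
          (dropLast_append_getLastD x r).symm]
        simp
      have h2 : pre.length + r.length = (pre ++ (x :: r).dropLast).length := by
        simp [List.length_dropLast]
      rw [h1, h2]
      exact getD_at_len _ _ 0 _
    simp only []
    rw [hgi, hgj]
    have hsub : pre.length + r.length - pre.length = r.length := by omega
    rw [hsub]
    have hstep : pre.length + r.length + 1 = (pre ++ x :: r).length := by
      simp only [List.length_append, List.length_cons]
      omega
    by_cases h2 : r.length ≥ 2
    · rw [if_pos h2, hstep, hsplit, bLoop_spec rest (pre ++ x :: r)]
      rw [G]
      simp only [← hr, ← hrest]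
      rw [if_pos (by omega)]
      simp
    · rw [if_neg h2]
      by_cases h0 : r.length = 0
      · have hr0 : r = [] := List.length_eq_zero_iff.mp h0
        rw [if_pos (by omega : pre.length + r.length = pre.length)]
        rw [hstep, hsplit, bLoop_spec rest (pre ++ x :: r)]
        rw [G]
        simp only [← hr, ← hrest]
        rw [if_neg (by omega)]
        subst hr0
        simp
      · obtain ⟨y, hy⟩ : ∃ y, r = [y] := by
          cases r with
          | nil => simp at h0
          | cons a s => cases s with
            | nil => exact ⟨a, rfl⟩
            | cons b u => exfalso; simp only [List.length_cons] at h2; omega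
        rw [if_neg (by omega)]
        rw [hstep, hsplit, bLoop_spec rest (pre ++ x :: r)]
        rw [G]
        simp only [← hr, ← hrest]
        rw [if_neg (by omega)]
        subst hy
        simp
  termination_by t.length
  decreasing_by
    all_goals (have h := takeRun_len x t; simp only [List.length_cons] at *; omega)

-- ===== VERDICT (by name: the statement is the Claim_ definition above) =====
theorem solution_spec : Claim_equal_solution := by
  intro args _
  unfold Spec_solution solution solution_alt
  have hA := aOuter_spec args []
  simp only [List.map_nil, List.nil_append, List.length_nil] at hA
  have hlen : args.length = (args.map (Sum.inl : Int → Int ⊕ String)).length := by simp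
  have hB := bLoop_spec args [] []
  simp only [List.nil_append, List.length_nil] at hB
  rw [hA, hB]
  congr 1
  rw [List.map_map, show aStr ∘ Sum.inr = id from rfl, List.map_id]
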